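-- pv_equiv track=rewrite | github.com/yuki-tamaribuchi/py_aes | src/aes/merge_block.py | merge_block
-- ===== SOURCE A (Python) =====
-- def merge_block(data):
-- 	merged_list = []
--
-- 	for block in data:
-- 		block_length = len(block)
-- 		for i in range(block_length):
-- 			for j in range(block_length):
-- 				merged_list.append(block[j][i])
-- 	return merged_list
-- ===== SOURCE B (Python) =====
-- def merge_block(data):
-- 	merged_list = []
-- 	for block in data:
-- 		n = len(block)
-- 		out = [0] * (n * n)
-- 		for j, row in enumerate(block):
-- 			out[j::n] = row[:n]
-- 		merged_list += out
-- 	return merged_list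
-- ===== Notes on version B (the rewrite author's own statement) =====
-- stated objective: alternative
-- what changed: B preallocates a flat n*n output buffer per block and scatters each row j into it in one row-major pass via the strided slice assignment out[j::n] = row[:n], instead of A's nested i/j index loops that gather elements column by column with double indexing.
import Mathlib
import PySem

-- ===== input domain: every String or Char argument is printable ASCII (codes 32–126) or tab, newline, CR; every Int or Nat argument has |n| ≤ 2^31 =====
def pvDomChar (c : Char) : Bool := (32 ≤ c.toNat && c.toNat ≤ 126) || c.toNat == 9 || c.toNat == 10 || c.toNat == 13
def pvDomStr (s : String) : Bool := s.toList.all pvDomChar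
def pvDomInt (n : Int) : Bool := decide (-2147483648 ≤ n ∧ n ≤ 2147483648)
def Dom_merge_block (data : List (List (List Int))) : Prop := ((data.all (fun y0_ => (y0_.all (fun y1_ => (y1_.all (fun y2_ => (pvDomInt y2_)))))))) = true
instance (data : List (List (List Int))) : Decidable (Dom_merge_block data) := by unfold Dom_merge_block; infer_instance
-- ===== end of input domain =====

-- B preallocates a flat n*n buffer per block and SCATTERS each row j into it with a strided
-- slice assignment out[j::n] = row[:n] (one row-major pass, arithmetic placement), instead of
-- A's nested i/j index loops that GATHER elements column by column (objective: alternative).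

-- ===== PORT A =====
def merge_block (data : List (List (List Int))) : List Int :=
  data.foldl (fun merged_list block =>
    let block_length : Int := block.length
    (PySem.List.pyRange 0 block_length 1).foldl (fun merged_list i =>
      (PySem.List.pyRange 0 block_length 1).foldl (fun merged_list j =>
        merged_list ++ [PySem.List.pyGetD (PySem.List.pyGetD block j []) i 0]) merged_list) merged_list) []

-- ===== PORT B =====
-- Exact model of Python's o[start::step] = vals for start ≤ len(o): a step-1 slice replaces the
-- whole tail from start; an extended slice (step ≥ 2) writes each position in turn (Python then
-- demands len(vals) = position count and raises ValueError otherwise; such calls are outside Pre_).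
def stridedAssign (o : List Int) (start step : Nat) (vals : List Int) : List Int :=
  if step = 1 then o.take start ++ vals
  else (vals.zipIdx).foldl (fun o vk => o.set (start + vk.2 * step) vk.1) o

def merge_block_alt (data : List (List (List Int))) : List Int :=
  data.foldl (fun merged_list block =>
    let n := block.length
    let out := List.replicate (n * n) (0 : Int)
    let out := (block.zipIdx).foldl (fun o rj => stridedAssign o rj.2 n (rj.1.take n)) out
    merged_list ++ out) []

-- ===== PRECONDITION & SPEC =====
-- Pre_ admits exactly the inputs on which A returns: every row of a block at least as long as
-- the block; on a block with a shorter row A raises IndexError (B raises ValueError there, except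
-- that a 1-row block with an empty row is silently dropped by its step-1 slice assignment).
def Pre_merge_block (data : List (List (List Int))) : Prop :=
  ∀ block ∈ data, ∀ row ∈ block, block.length ≤ row.length
instance (data : List (List (List Int))) : Decidable (Pre_merge_block data) := by
  unfold Pre_merge_block; infer_instance

def pvWitness_merge_block : List (List (List Int)) := [[[1, 2], [3, 4]], [[5]]]

def Spec_merge_block (data : List (List (List Int))) (out : List Int) : Prop := out = merge_block_alt data
instance (data : List (List (List Int))) (out : List Int) : Decidable (Spec_merge_block data out) := by unfold Spec_merge_block; infer_instance

-- ===== CLAIM (what is proved, stated in full; the proofs are below) =====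
def Claim_equal_merge_block : Prop := ∀ (data : List (List (List Int))), Dom_merge_block data → Pre_merge_block data → Spec_merge_block data (merge_block data)

-- ===== LEMMAS AND PROOFS =====

theorem foldl_append_single (L : List Int) (f : Int → Int) (acc : List Int) :
    L.foldl (fun a x => a ++ [f x]) acc = acc ++ L.map f := by
  induction L generalizing acc with
  | nil => simp
  | cons c cs ih => simp [List.foldl_cons, ih, List.append_assoc]

theorem foldl_append_list (L : List Int) (f : Int → List Int) (acc : List Int) :
    L.foldl (fun a x => a ++ f x) acc = acc ++ L.flatMap f := by
  induction L generalizing acc with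
  | nil => simp
  | cons c cs ih => simp [List.foldl_cons, ih, List.append_assoc, List.flatMap_cons]

-- a map over a list, re-indexed over range of its length
theorem map_eq_range_getD {α β : Type} (l : List α) (f : α → β) (d : α) :
    l.map f = (List.range l.length).map (fun j => f (l.getD j d)) := by
  induction l with
  | nil => simp
  | cons a t ih =>
      simp only [List.map_cons, List.length_cons, List.range_succ_eq_map, List.map_map]
      rw [ih]
      simp [Function.comp]

-- flatMap of per-column maps, re-indexed as a single map over range (a*b)
theorem flatMap_range_map (b : Nat) (hb : 0 < b) (f : Nat → Nat → Int) :
    ∀ a : Nat, (List.range a).flatMap (fun i => (List.range b).map (fun j => f i j))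
      = (List.range (a * b)).map (fun p => f (p / b) (p % b)) := by
  intro a
  induction a with
  | zero => simp
  | succ a ih =>
      rw [List.range_succ, List.flatMap_append, ih, Nat.succ_mul, List.range_add,
        List.map_append, List.map_map, List.flatMap_cons, List.flatMap_nil, List.append_nil]
      congr 1
      apply List.map_congr_left
      intro t ht
      have htb : t < b := List.mem_range.mp ht
      simp only [Function.comp]
      have h1 : (a * b + t) / b = a := by
        rw [Nat.mul_comm a b, Nat.mul_add_div hb, Nat.div_eq_of_lt htb, Nat.add_zero]
      have h2 : (a * b + t) % b = t := by
        rw [Nat.mul_comm a b, Nat.mul_add_mod, Nat.mod_eq_of_lt htb]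
      rw [h1, h2]

-- setting one element of a mapped range
theorem set_map_range (N q : Nat) (g : Nat → Int) (v : Int) :
    ((List.range N).map g).set q v = (List.range N).map (fun p => if p = q then v else g p) := by
  apply List.ext_getElem
  · simp
  · intro i h1 h2
    simp only [List.getElem_set, List.getElem_map, List.getElem_range]
    by_cases h : q = i
    · simp [h]
    · have h2 : ¬ i = q := fun hh => h (Eq.symm hh)
      simp [h, h2]

-- one strided write out[j::n] = vals on a mapped range buffer
theorem scatter_aux (n j : Nat) (hj : j < n) :
    ∀ (vals : List Int) (k0 : Nat) (g : Nat → Int), k0 + vals.length ≤ n →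
    (vals.zipIdx k0).foldl (fun o vk => o.set (j + vk.2 * n) vk.1) ((List.range (n * n)).map g)
    = (List.range (n * n)).map (fun p =>
        if p % n = j ∧ k0 ≤ p / n ∧ p / n < k0 + vals.length then vals.getD (p / n - k0) 0 else g p) := by
  intro vals
  induction vals with
  | nil =>
      intro k0 g _
      simp only [List.zipIdx_nil, List.foldl_nil]
      apply List.map_congr_left
      intro p _
      have : ¬ (p % n = j ∧ k0 ≤ p / n ∧ p / n < k0 + ([] : List Int).length) := by
        simp only [List.length_nil]; omega
      rw [if_neg this]
  | cons v vs ih =>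
      intro k0 g hlen
      rw [List.zipIdx_cons, List.foldl_cons, set_map_range, ih (k0 + 1) _ (by simp at hlen ⊢; omega)]
      apply List.map_congr_left
      intro p hp
      have hpN : p < n * n := List.mem_range.mp hp
      have hn : 0 < n := Nat.lt_of_le_of_lt (Nat.zero_le _) hj
      have hdm : n * (p / n) + p % n = p := Nat.div_add_mod p n
      have hm : p % n < n := Nat.mod_lt p hn
      have hkey : p = j + k0 * n ↔ (p % n = j ∧ p / n = k0) := by
        constructor
        · intro h
          subst h
          constructor
          · rw [Nat.add_mul_mod_self_right, Nat.mod_eq_of_lt hj]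
          · rw [Nat.add_mul_div_right _ _ hn, Nat.div_eq_of_lt hj, Nat.zero_add]
        · intro ⟨h1, h2⟩
          rw [← hdm, h1, h2]; ring
      by_cases hc : p % n = j ∧ k0 ≤ p / n ∧ p / n < k0 + (v :: vs).length
      · simp only [List.length_cons] at hc
        by_cases he : p / n = k0
        · have hne : ¬ (p % n = j ∧ k0 + 1 ≤ p / n ∧ p / n < k0 + 1 + vs.length) := by omega
          have hpe : p = j + k0 * n := hkey.mpr ⟨hc.1, he⟩
          simp only [List.length_cons]
          rw [if_neg hne, if_pos hpe, if_pos (by omega : p % n = j ∧ k0 ≤ p / n ∧ p / n < k0 + (vs.length + 1)),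
            he, Nat.sub_self]
          rfl
        · have hgt : k0 + 1 ≤ p / n := by omega
          have hyes : p % n = j ∧ k0 + 1 ≤ p / n ∧ p / n < k0 + 1 + vs.length := by omega
          simp only [List.length_cons]
          rw [if_pos hyes, if_pos (by omega : p % n = j ∧ k0 ≤ p / n ∧ p / n < k0 + (vs.length + 1))]
          have hsub : p / n - k0 = (p / n - (k0 + 1)) + 1 := by omega
          rw [hsub]
          rfl
      · simp only [List.length_cons] at hc
        have hne1 : ¬ (p % n = j ∧ k0 + 1 ≤ p / n ∧ p / n < k0 + 1 + vs.length) := by omega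
        have hne2 : p ≠ j + k0 * n := by
          intro h
          exact hc (by have := hkey.mp h; omega)
        simp only [List.length_cons]
        rw [if_neg hne1, if_neg hne2, if_neg (by omega : ¬ (p % n = j ∧ k0 ≤ p / n ∧ p / n < k0 + (vs.length + 1)))]

-- getD through take, within the taken prefix
theorem getD_take (l : List Int) (n t : Nat) (ht : t < n) :
    (l.take n).getD t 0 = l.getD t 0 := by
  simp [List.getD_eq_getElem?_getD, ht]

-- under Pre_'s shape conditions both branches of stridedAssign perform the same writes
theorem stridedAssign_eq_scatter (o vals : List Int) (j n : Nat) (hj : j < n)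
    (hv : vals.length = n) (ho : o.length = n * n) :
    stridedAssign o j n vals
      = (vals.zipIdx).foldl (fun o vk => o.set (j + vk.2 * n) vk.1) o := by
  unfold stridedAssign
  by_cases h : n = 1
  · subst h
    have hj0 : j = 0 := by omega
    obtain ⟨v, hv⟩ := List.length_eq_one_iff.mp hv
    obtain ⟨x, hx⟩ := List.length_eq_one_iff.mp (by simpa using ho)
    subst hj0 hv hx
    rfl
  · rw [if_neg h]

-- the whole row loop of B on a mapped range buffer
theorem rows_aux (n : Nat) (hn : 0 < n) :
    ∀ (rows : List (List Int)) (j0 : Nat) (g : Nat → Int), j0 + rows.length ≤ n →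
      (∀ r ∈ rows, n ≤ r.length) →
    (rows.zipIdx j0).foldl (fun o rj => stridedAssign o rj.2 n (rj.1.take n)) ((List.range (n * n)).map g)
    = (List.range (n * n)).map (fun p =>
        if j0 ≤ p % n ∧ p % n < j0 + rows.length then (rows.getD (p % n - j0) []).getD (p / n) 0 else g p) := by
  intro rows
  induction rows with
  | nil =>
      intro j0 g _ _
      simp only [List.zipIdx_nil, List.foldl_nil]
      apply List.map_congr_left
      intro p _
      have : ¬ (j0 ≤ p % n ∧ p % n < j0 + ([] : List (List Int)).length) := by
        simp only [List.length_nil]; omega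
      rw [if_neg this]
  | cons r rs ih =>
      intro j0 g hlen hrows
      have hj0 : j0 < n := by simp at hlen; omega
      have hr : n ≤ r.length := hrows r (by simp)
      have htk : (r.take n).length = n := by simp [Nat.min_eq_left hr]
      rw [List.zipIdx_cons, List.foldl_cons]
      show (rs.zipIdx (j0 + 1)).foldl _ (stridedAssign _ j0 n (r.take n)) = _
      rw [stridedAssign_eq_scatter _ _ j0 n hj0 htk (by simp),
        scatter_aux n j0 hj0 (r.take n) 0 g (by rw [htk]; omega),
        ih (j0 + 1) _ (by simp at hlen ⊢; omega) (fun x hx => hrows x (by simp [hx]))]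
      apply List.map_congr_left
      intro p hp
      have hpN : p < n * n := List.mem_range.mp hp
      have hdm : n * (p / n) + p % n = p := Nat.div_add_mod p n
      have hm : p % n < n := Nat.mod_lt p hn
      have hd : p / n < n := by
        by_contra hh
        have : n * n ≤ n * (p / n) := Nat.mul_le_mul_left n (Nat.le_of_not_lt hh)
        omega
      by_cases hc : j0 ≤ p % n ∧ p % n < j0 + (r :: rs).length
      · simp only [List.length_cons] at hc
        by_cases he : p % n = j0
        · have hne : ¬ (j0 + 1 ≤ p % n ∧ p % n < j0 + 1 + rs.length) := by omega
          simp only [List.length_cons]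
          rw [if_neg hne, if_pos (⟨he, Nat.zero_le _, by rw [htk]; omega⟩ : p % n = j0 ∧ 0 ≤ p / n ∧ p / n < 0 + (r.take n).length),
            if_pos (by omega : j0 ≤ p % n ∧ p % n < j0 + (rs.length + 1))]
          rw [he, Nat.sub_self, Nat.sub_zero]
          show (r.take n).getD (p / n) 0 = ((r :: rs).getD 0 []).getD (p / n) 0
          rw [getD_take r n (p / n) hd]
          rfl
        · have hyes : j0 + 1 ≤ p % n ∧ p % n < j0 + 1 + rs.length := by omega
          simp only [List.length_cons]
          rw [if_pos hyes, if_pos (by omega : j0 ≤ p % n ∧ p % n < j0 + (rs.length + 1))]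
          have hsub : p % n - j0 = (p % n - (j0 + 1)) + 1 := by omega
          rw [hsub]
          rfl
      · simp only [List.length_cons] at hc
        have hne1 : ¬ (j0 + 1 ≤ p % n ∧ p % n < j0 + 1 + rs.length) := by omega
        have hne2 : ¬ (p % n = j0 ∧ 0 ≤ p / n ∧ p / n < 0 + (r.take n).length) := by
          rw [htk]; omega
        simp only [List.length_cons]
        rw [if_neg hne1, if_neg hne2, if_neg (by omega : ¬ (j0 ≤ p % n ∧ p % n < j0 + (rs.length + 1)))]

-- A's per-block contribution, reduced to a single map over range (n*n)
theorem blockA_eq (block : List (List Int)) (acc : List Int) :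
    (PySem.List.pyRange 0 (block.length : Int) 1).foldl (fun ml i =>
      (PySem.List.pyRange 0 (block.length : Int) 1).foldl (fun ml j =>
        ml ++ [PySem.List.pyGetD (PySem.List.pyGetD block j []) i 0]) ml) acc
    = acc ++ (List.range (block.length * block.length)).map (fun p =>
        (block.getD (p % block.length) []).getD (p / block.length) 0) := by
  have hcolA : ∀ (i : Int) (a : List Int),
      (PySem.List.pyRange 0 (block.length : Int) 1).foldl (fun ml j =>
        ml ++ [PySem.List.pyGetD (PySem.List.pyGetD block j []) i 0]) a =
      a ++ block.map (fun r => PySem.List.pyGetD r i 0) := by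
    intro i a
    rw [foldl_append_single _ (fun j => PySem.List.pyGetD (PySem.List.pyGetD block j []) i 0) a]
    congr 1
    have := PySem.List.map_pyGetD_pyRange_zero' (xs := block) (d := ([] : List Int))
    calc (PySem.List.pyRange 0 (block.length : Int) 1).map
            (fun j => PySem.List.pyGetD (PySem.List.pyGetD block j []) i 0)
        = ((PySem.List.pyRange 0 (block.length : Int) 1).map
            (fun j => PySem.List.pyGetD block j [])).map (fun r => PySem.List.pyGetD r i 0) := by
          simp [List.map_map, Function.comp]
      _ = block.map (fun r => PySem.List.pyGetD r i 0) := by rw [this]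
  simp only [hcolA]
  rw [foldl_append_list _ (fun i => block.map fun r => PySem.List.pyGetD r i 0) acc]
  congr 1
  rcases Nat.eq_zero_or_pos block.length with hb | hb
  · rw [List.length_eq_zero_iff.mp hb]; simp [PySem.List.pyRange]
  · rw [PySem.List.pyRange_one]
    simp only [Int.sub_zero, Int.toNat_natCast]
    rw [List.flatMap_map]
    have hmap : ∀ i : Nat, block.map (fun r => PySem.List.pyGetD r ((0 : Int) + (i : Int)) 0)
        = (List.range block.length).map (fun j => (block.getD j []).getD i 0) := by
      intro i
      have : (fun r : List Int => PySem.List.pyGetD r ((0 : Int) + (i : Int)) 0)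
           = fun r : List Int => r.getD i 0 := by
        funext r
        rw [Int.zero_add, PySem.List.pyGetD_natCast]
      rw [this, map_eq_range_getD block (fun r => r.getD i 0) []]
    rw [List.flatMap_congr (fun i _ => hmap i),
      flatMap_range_map block.length hb (fun i j => (block.getD j []).getD i 0) block.length]

-- B's per-block contribution equals the same map
theorem blockB_eq (block : List (List Int)) (hsq : ∀ row ∈ block, block.length ≤ row.length) :
    (block.zipIdx).foldl (fun o rj => stridedAssign o rj.2 block.length (rj.1.take block.length))
      (List.replicate (block.length * block.length) (0 : Int))
    = (List.range (block.length * block.length)).map (fun p =>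
        (block.getD (p % block.length) []).getD (p / block.length) 0) := by
  rcases Nat.eq_zero_or_pos block.length with hb | hb
  · rw [List.length_eq_zero_iff.mp hb]; simp
  · have hrep : List.replicate (block.length * block.length) (0 : Int)
        = (List.range (block.length * block.length)).map (fun _ => 0) := by
      simp
    rw [hrep]
    have := rows_aux block.length hb block 0 (fun _ => 0) (by omega) hsq
    rw [show block.zipIdx = block.zipIdx 0 from rfl, this]
    apply List.map_congr_left
    intro p hp
    have hm : p % block.length < block.length := Nat.mod_lt p hb
    rw [if_pos (by omega : 0 ≤ p % block.length ∧ p % block.length < 0 + block.length), Nat.sub_zero]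

theorem merge_eq (data : List (List (List Int)))
    (h : ∀ block ∈ data, ∀ row ∈ block, block.length ≤ row.length) :
    ∀ acc : List Int,
    data.foldl (fun merged_list block =>
      let block_length : Int := block.length
      (PySem.List.pyRange 0 block_length 1).foldl (fun merged_list i =>
        (PySem.List.pyRange 0 block_length 1).foldl (fun merged_list j =>
          merged_list ++ [PySem.List.pyGetD (PySem.List.pyGetD block j []) i 0]) merged_list) merged_list) acc
    = data.foldl (fun merged_list block =>
        let n := block.length
        let out := List.replicate (n * n) (0 : Int)
        let out := (block.zipIdx).foldl (fun o rj => stridedAssign o rj.2 n (rj.1.take n)) out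
        merged_list ++ out) acc := by
  induction data with
  | nil => intro acc; rfl
  | cons b bs ih =>
      intro acc
      simp only [List.foldl_cons]
      rw [blockA_eq b acc]
      rw [show ((b.zipIdx).foldl (fun o rj => stridedAssign o rj.2 b.length (rj.1.take b.length))
            (List.replicate (b.length * b.length) (0 : Int)))
          = (List.range (b.length * b.length)).map (fun p =>
              (b.getD (p % b.length) []).getD (p / b.length) 0)
        from blockB_eq b (h b (by simp))]
      exact ih (fun bl hbl => h bl (by simp [hbl])) _

-- ===== VERDICT (by name: the statement is the Claim_ definition above) =====
theorem merge_block_spec : Claim_equal_merge_block := by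
  intro data _ hpre
  unfold Spec_merge_block merge_block merge_block_alt
  exact merge_eq data hpre []
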